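-- pv_equiv track=rewrite | github.com/zz9tf/read_wikipedia | code/string_preprocessing.py | remove_square_brackets
-- ===== SOURCE A (Python) =====
-- def remove_square_brackets(text):
--     square_stack = []
--     result = []
--     i = 0
--
--     while i < len(text):
--         char = text[i]
--
--         if char == '[' and i + 1 < len(text) and text[i + 1] == '[':
--             # Start of a square bracket block
--             square_stack.append(len(result))  # Save the position in result
--             i += 1  # Skip the second '['
--         elif char == ']' and i + 1 < len(text) and text[i + 1] == ']' and len(square_stack) > 0:
--             # End of a square bracket block
--             start = square_stack.pop()
--             block_content = ''.join(result[start:])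
--             if '|' in block_content:
--                 # Keep only the content after '|' for other cases
--                 keep_content = block_content.split('|')[-1]
--                 result = result[:start] + list(keep_content)
--             i += 1  # Skip the second ']'
--         else:
--             # Add the character to the result if not within brackets or after processing
--             result.append(char)
--         i += 1
--
--     return ''.join(result)
-- ===== SOURCE B (Python) =====
-- def remove_square_brackets(text):
--     # Recursive-descent parser: each '[[' starts a sub-parse that returns its
--     # (possibly pipe-trimmed) content and the position of its closing ']]';
--     # no explicit stack and no rebuilding of a shared result buffer.
--     n = len(text)
--
--     def parse(i, nested):
--         parts = []
--         while i < n: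
--             c = text[i]
--             if c == '[' and i + 1 < n and text[i + 1] == '[':
--                 inner, j = parse(i + 2, True)
--                 parts.append(inner)
--                 i = j + 2
--             elif c == ']' and i + 1 < n and text[i + 1] == ']' and nested:
--                 content = ''.join(parts)
--                 if '|' in content:
--                     content = content.rsplit('|', 1)[1]
--                 return content, i
--             else:
--                 parts.append(c)
--                 i += 1
--         return ''.join(parts), i
--
--     return parse(0, False)[0]
-- ===== Notes on version B (the rewrite author's own statement) =====
-- stated objective: alternative
-- what changed: Replaces A's single flat result list with saved start positions (rebuilt via result[:start]+list(keep) on each block close) by a recursive-descent parser: each '[[' spawns a sub-parse that returns the block's pipe-trimmed content and the position of its closing ']]', so no result buffer is ever rebuilt; not measurably faster on the timed inputs.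
import Mathlib
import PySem

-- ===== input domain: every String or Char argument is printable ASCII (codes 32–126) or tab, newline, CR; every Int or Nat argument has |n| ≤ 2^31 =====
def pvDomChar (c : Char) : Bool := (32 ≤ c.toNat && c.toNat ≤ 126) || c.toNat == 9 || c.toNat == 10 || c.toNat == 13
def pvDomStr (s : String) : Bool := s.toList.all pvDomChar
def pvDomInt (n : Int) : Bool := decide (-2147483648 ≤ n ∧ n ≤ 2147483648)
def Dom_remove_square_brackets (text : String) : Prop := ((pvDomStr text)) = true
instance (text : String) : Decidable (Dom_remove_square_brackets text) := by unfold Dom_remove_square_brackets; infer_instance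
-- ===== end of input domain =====

-- B replaces A's flat result buffer with saved start positions (rebuilt wholesale on
-- each block close) by a recursive-descent parser: each '[[' starts a sub-parse that
-- returns its content and the position of its closing ']]' (objective: alternative).

-- ===== PORT A =====
-- exact port of "block_content.split('|')[-1]": the characters after the last '|'
-- (A only evaluates it when '|' is in the block)
def pvAfterLastPipe (l : List Char) : List Char := (l.reverse.takeWhile (· ≠ '|')).reverse

-- A's while-loop; Python's `square_stack` appends/pops at the END, represented here with
-- the top at the HEAD of `sq`. `text.getD i ' '` is exact for `text[i]` since the loop
-- guarantees i < len(text).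
def pvGoA (text : List Char) (sq : List Nat) (result : List Char) (i : Nat) : List Char :=
  if _h : i < text.length then
    let c := text.getD i ' '
    if c = '[' ∧ i + 1 < text.length ∧ text.getD (i+1) ' ' = '[' then
      pvGoA text (result.length :: sq) result (i+2)
    else if c = ']' ∧ i + 1 < text.length ∧ text.getD (i+1) ' ' = ']' then
      -- `len(square_stack) > 0` decides between the pop branch and the plain-append branch
      match sq with
      | start :: rest =>
        let block := result.drop start
        let result' := if block.contains '|' then result.take start ++ pvAfterLastPipe block
                       else result
        pvGoA text rest result' (i+2)
      | [] => pvGoA text [] (result ++ [c]) (i+1)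
    else
      pvGoA text sq (result ++ [c]) (i+1)
  else result
termination_by text.length - i
decreasing_by all_goals omega

def remove_square_brackets (text : String) : String :=
  String.ofList (pvGoA text.toList [] [] 0)

-- ===== PORT B =====
-- exact port of "content.rsplit('|', 1)[1]" (B only evaluates it when '|' is in content)
def pvRsplitLastPipe (l : List Char) : List Char := (l.reverse.takeWhile (· ≠ '|')).reverse

-- B's recursive parse(i, nested): returns (content, j) where j is the position of the
-- level's closing ']]' (or an index ≥ len(text) if the text ran out); the caller resumes
-- at j+2. `fuel` is a totality guard only: fuel = len(text)+1 is never exhausted since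
-- every call either returns or advances i by at least 1 along every call chain.
def pvParse (text : List Char) (fuel : Nat) (nested : Bool) (i : Nat) (parts : List Char) :
    List Char × Nat :=
  match fuel with
  | 0 => (parts, i)
  | f + 1 =>
    if i < text.length then
      let c := text.getD i ' '
      if c = '[' ∧ i + 1 < text.length ∧ text.getD (i+1) ' ' = '[' then
        let r := pvParse text f true (i+2) []
        pvParse text f nested (r.2 + 2) (parts ++ r.1)
      else if c = ']' ∧ i + 1 < text.length ∧ text.getD (i+1) ' ' = ']' ∧ nested = true then
        ((if parts.contains '|' then pvRsplitLastPipe parts else parts), i)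
      else
        pvParse text f nested (i+1) (parts ++ [c])
    else (parts, i)

def remove_square_brackets_alt (text : String) : String :=
  String.ofList (pvParse text.toList (text.toList.length + 1) false 0 []).1

-- ===== PRECONDITION & SPEC =====
def Spec_remove_square_brackets (text : String) (out : String) : Prop := out = remove_square_brackets_alt text
instance (text : String) (out : String) : Decidable (Spec_remove_square_brackets text out) := by unfold Spec_remove_square_brackets; infer_instance

-- ===== CLAIM (what is proved, stated in full; the proofs are below) =====
def Claim_equal_remove_square_brackets : Prop := ∀ (text : String), Dom_remove_square_brackets text → Spec_remove_square_brackets text (remove_square_brackets text)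

-- ===== LEMMAS AND PROOFS =====

-- Proof-side bridge: a stack-machine with one buffer per open block (top at the HEAD).
-- A equals its flattening (pv_inv); B's parser equals its flattening too (pv_bridge).
def pvGoB (text : List Char) (stack : List (List Char)) (i : Nat) : List (List Char) :=
  if _h : i < text.length then
    let c := text.getD i ' '
    if c = '[' ∧ i + 1 < text.length ∧ text.getD (i+1) ' ' = '[' then
      pvGoB text ([] :: stack) (i+2)
    else if c = ']' ∧ i + 1 < text.length ∧ text.getD (i+1) ' ' = ']' ∧ 1 < stack.length then
      match stack with
      | b :: p :: rest =>
        let x := if b.contains '|' then pvAfterLastPipe b else b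
        pvGoB text ((p ++ x) :: rest) (i+2)
      | s => pvGoB text s (i+2)  -- unreachable: the guard forces 1 < stack.length
    else
      match stack with
      | b :: rest => pvGoB text ((b ++ [c]) :: rest) (i+1)
      | [] => pvGoB text [] (i+1)  -- unreachable: the stack is never empty
  else stack
termination_by text.length - i
decreasing_by all_goals omega

-- A's position stack reconstructed from the buffer stack: each saved position is the
-- total length of everything strictly below that buffer.
def pvPosOf : List (List Char) → List Nat
  | [] => []
  | [_] => []
  | _ :: rest => rest.reverse.flatten.length :: pvPosOf rest

theorem pvPosOf_indep (b b' : List Char) (rest : List (List Char)) :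
    pvPosOf (b :: rest) = pvPosOf (b' :: rest) := by
  cases rest <;> rfl

-- the invariant: A's loop on the flattened buffers with the reconstructed position
-- stack equals the flattening of the stack machine's result
theorem pv_inv (text : List Char) :
    ∀ k i bufs, bufs ≠ [] → text.length - i ≤ k →
      pvGoA text (pvPosOf bufs) bufs.reverse.flatten i = (pvGoB text bufs i).reverse.flatten := by
  intro k
  induction k with
  | zero =>
    intro i bufs hne hk
    rw [pvGoA.eq_def, pvGoB.eq_def]
    have hlt : ¬ i < text.length := by omega
    simp [hlt]
  | succ k ih =>
    intro i bufs hne hk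
    obtain ⟨b, rest, rfl⟩ := List.exists_cons_of_ne_nil hne
    by_cases hlt : i < text.length
    · rw [pvGoA.eq_def, pvGoB.eq_def]
      simp only [dif_pos hlt]
      by_cases h1 : text.getD i ' ' = '[' ∧ i + 1 < text.length ∧ text.getD (i+1) ' ' = '['
      · rw [if_pos h1, if_pos h1]
        have hIH := ih (i+2) ([] :: b :: rest) (by simp) (by omega)
        simpa [pvPosOf] using hIH
      · rw [if_neg h1, if_neg h1]
        by_cases h2 : text.getD i ' ' = ']' ∧ i + 1 < text.length ∧ text.getD (i+1) ' ' = ']'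
        · cases rest with
          | nil =>
            have h2' : ¬ (text.getD i ' ' = ']' ∧ i + 1 < text.length ∧ text.getD (i+1) ' ' = ']' ∧ 1 < ([b] : List (List Char)).length) := by
              simp
            rw [if_pos h2, if_neg h2']
            simp only [pvPosOf]
            have hIH := ih (i+1) [b ++ [text.getD i ' ']] (by simp) (by omega)
            simpa [pvPosOf] using hIH
          | cons p rest' =>
            have h2' : text.getD i ' ' = ']' ∧ i + 1 < text.length ∧ text.getD (i+1) ' ' = ']' ∧ 1 < (b :: p :: rest' : List (List Char)).length := by
              exact ⟨h2.1, h2.2.1, h2.2.2, by simp⟩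
            rw [if_pos h2, if_pos h2']
            simp only [pvPosOf]
            have hres : (b :: p :: rest').reverse.flatten = (p :: rest').reverse.flatten ++ b := by
              simp
            rw [hres, List.drop_left, List.take_left]
            by_cases hb : b.contains '|'
            · rw [if_pos hb, if_pos hb]
              have hIH := ih (i+2) ((p ++ pvAfterLastPipe b) :: rest') (by simp) (by omega)
              rw [pvPosOf_indep (p ++ pvAfterLastPipe b) p rest'] at hIH
              simpa [List.append_assoc] using hIH
            · rw [if_neg hb, if_neg hb]
              have hIH := ih (i+2) ((p ++ b) :: rest') (by simp) (by omega)
              rw [pvPosOf_indep (p ++ b) p rest'] at hIH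
              simpa [List.append_assoc, hres] using hIH
        · have h2' : ¬ (text.getD i ' ' = ']' ∧ i + 1 < text.length ∧ text.getD (i+1) ' ' = ']' ∧ 1 < (b :: rest : List (List Char)).length) := by
            intro h; exact h2 ⟨h.1, h.2.1, h.2.2.1⟩
          rw [if_neg h2, if_neg h2']
          have hIH := ih (i+1) ((b ++ [text.getD i ' ']) :: rest) (by simp) (by omega)
          rw [pvPosOf_indep (b ++ [text.getD i ' ']) b rest] at hIH
          simpa [List.append_assoc] using hIH
    · rw [pvGoA.eq_def, pvGoB.eq_def]
      simp [hlt]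

-- the parser never moves backwards
theorem pvParse_ge (text : List Char) :
    ∀ f nested i parts, i ≤ (pvParse text f nested i parts).2 := by
  intro f
  induction f with
  | zero => intro nested i parts; simp [pvParse]
  | succ f ih =>
    intro nested i parts
    rw [pvParse]
    by_cases hlt : i < text.length
    · simp only [if_pos hlt]
      by_cases h1 : text.getD i ' ' = '[' ∧ i + 1 < text.length ∧ text.getD (i+1) ' ' = '['
      · rw [if_pos h1]
        have g1 := ih true (i+2) []
        have g2 := ih nested ((pvParse text f true (i+2) []).2 + 2)
          (parts ++ (pvParse text f true (i+2) []).1)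
        omega
      · rw [if_neg h1]
        by_cases h2 : text.getD i ' ' = ']' ∧ i + 1 < text.length ∧ text.getD (i+1) ' ' = ']' ∧ nested = true
        · rw [if_pos h2]
        · rw [if_neg h2]
          have := ih nested (i+1) (parts ++ [text.getD i ' '])
          omega
    · simp [if_neg hlt]

-- once past the end, the parser returns immediately
theorem pvParse_stop (text : List Char) (f : Nat) (nested : Bool) (i : Nat) (parts : List Char)
    (h : text.length ≤ i) : pvParse text f nested i parts = (parts, i) := by
  cases f with
  | zero => rfl
  | succ f => rw [pvParse]; simp [Nat.not_lt.mpr h]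

-- what the parse result means in terms of the stack machine, depending on the level
def pvRhs (text : List Char) (s : List (List Char)) (cj : List Char × Nat) : List Char :=
  match s with
  | [] => cj.1
  | p :: rest =>
      if cj.2 < text.length then (pvGoB text ((p ++ cj.1) :: rest) (cj.2 + 2)).reverse.flatten
      else rest.reverse.flatten ++ p ++ cj.1

-- the bridge: the parser computes the flattening of the stack machine
theorem pv_bridge (text : List Char) :
    ∀ f i parts s, text.length ≤ f + i →
      (pvGoB text (parts :: s) i).reverse.flatten =
        pvRhs text s (pvParse text f (!s.isEmpty) i parts) := by
  intro f
  induction f with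
  | zero =>
    intro i parts s hf
    rw [pvParse, pvGoB.eq_def]
    have hlt : ¬ i < text.length := by omega
    cases s with
    | nil => simp [hlt, pvRhs]
    | cons p rest => simp [hlt, pvRhs, List.append_assoc]
  | succ f ih =>
    intro i parts s hf
    by_cases hlt : i < text.length
    · rw [pvParse, pvGoB.eq_def]
      simp only [if_pos hlt, dif_pos hlt]
      by_cases h1 : text.getD i ' ' = '[' ∧ i + 1 < text.length ∧ text.getD (i+1) ' ' = '['
      · rw [if_pos h1, if_pos h1]
        set r1 := pvParse text f true (i+2) [] with hr1
        have hge : i + 2 ≤ r1.2 := pvParse_ge text f true (i+2) []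
        have hchild := ih (i+2) [] (parts :: s) (by omega)
        have hchild' : (pvGoB text ([] :: parts :: s) (i+2)).reverse.flatten
            = pvRhs text (parts :: s) r1 := by simpa using hchild
        rw [hchild']
        by_cases hc : r1.2 < text.length
        · have hcont := ih (r1.2 + 2) (parts ++ r1.1) s (by omega)
          simp only [pvRhs, if_pos hc]
          exact hcont
        · have hstop : pvParse text f (!s.isEmpty) (r1.2 + 2) (parts ++ r1.1)
              = (parts ++ r1.1, r1.2 + 2) :=
            pvParse_stop text f _ _ _ (by omega)
          rw [hstop]
          cases s with
          | nil => simp [pvRhs, if_neg hc]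
          | cons p rest =>
            have hc2 : ¬ r1.2 + 2 < text.length := by omega
            simp [pvRhs, if_neg hc, if_neg hc2, List.append_assoc]
      · rw [if_neg h1, if_neg h1]
        by_cases h2 : text.getD i ' ' = ']' ∧ i + 1 < text.length ∧ text.getD (i+1) ' ' = ']'
        · cases s with
          | nil =>
            have hB : ¬ (text.getD i ' ' = ']' ∧ i + 1 < text.length ∧ text.getD (i+1) ' ' = ']' ∧ 1 < ([parts] : List (List Char)).length) := by simp
            have hP : ¬ (text.getD i ' ' = ']' ∧ i + 1 < text.length ∧ text.getD (i+1) ' ' = ']' ∧ (!([] : List (List Char)).isEmpty) = true) := by simp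
            rw [if_neg hB, if_neg hP]
            have := ih (i+1) (parts ++ [text.getD i ' ']) [] (by omega)
            simpa using this
          | cons p rest =>
            have hB : text.getD i ' ' = ']' ∧ i + 1 < text.length ∧ text.getD (i+1) ' ' = ']' ∧ 1 < (parts :: p :: rest : List (List Char)).length :=
              ⟨h2.1, h2.2.1, h2.2.2, by simp⟩
            have hP : text.getD i ' ' = ']' ∧ i + 1 < text.length ∧ text.getD (i+1) ' ' = ']' ∧ (!(p :: rest : List (List Char)).isEmpty) = true :=
              ⟨h2.1, h2.2.1, h2.2.2, by simp⟩
            rw [if_pos hB, if_pos hP]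
            simp only [pvRhs, if_pos hlt]
            rfl
        · have hB : ¬ (text.getD i ' ' = ']' ∧ i + 1 < text.length ∧ text.getD (i+1) ' ' = ']' ∧ 1 < (parts :: s : List (List Char)).length) := by
            intro h; exact h2 ⟨h.1, h.2.1, h.2.2.1⟩
          have hP : ¬ (text.getD i ' ' = ']' ∧ i + 1 < text.length ∧ text.getD (i+1) ' ' = ']' ∧ (!s.isEmpty) = true) := by
            intro h; exact h2 ⟨h.1, h.2.1, h.2.2.1⟩
          rw [if_neg hB, if_neg hP]
          have := ih (i+1) (parts ++ [text.getD i ' ']) s (by omega)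
          simpa using this
    · rw [pvParse, pvGoB.eq_def]
      simp only [if_neg hlt, dif_neg hlt]
      cases s with
      | nil => simp [pvRhs]
      | cons p rest => simp [pvRhs, if_neg (by omega : ¬ i < text.length), List.append_assoc]

-- ===== VERDICT (by name: the statement is the Claim_ definition above) =====
theorem remove_square_brackets_spec : Claim_equal_remove_square_brackets := by
  intro text _
  unfold Spec_remove_square_brackets remove_square_brackets remove_square_brackets_alt
  have h1 := pv_inv text.toList text.toList.length 0 [[]] (by simp) (by omega)
  have h2 := pv_bridge text.toList (text.toList.length + 1) 0 [] [] (by omega)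
  simp only [pvPosOf] at h1
  simp only [List.isEmpty_nil, Bool.not_true, pvRhs] at h2
  rw [show ([[]] : List (List Char)).reverse.flatten = [] by rfl] at h1
  exact congrArg String.ofList (h1.trans (by simpa using h2))
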